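-- pv_equiv track=rewrite | github.com/jcarreiro/advent-of-code | day_16/solution.py | get_pattern_row
-- ===== SOURCE A (Python) =====
-- import math
--
-- def get_pattern_row(base_pattern, input_len, output_pos):
--     pattern = []
--     for x in base_pattern:
--         pattern += [x] * (output_pos + 1)
--
--     # Note the plus 1 here is because we shift the whole pattern left once.
--     j = input_len + 1
--
--     # Copy pattern enough times to cover the whole input.
--     n = math.ceil(j / len(pattern))
--     if n > 1:
--         pattern = pattern * n
--
--     # Note the [1:] here is to skip the first digit of the pattern.
--     return pattern[1:j]
-- ===== SOURCE B (Python) =====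
-- def get_pattern_row(base_pattern, input_len, output_pos):
--     # Compute each output element directly by index arithmetic: output index i
--     # holds base_pattern[((i + 1) // (output_pos + 1)) % len(base_pattern)],
--     # with no intermediate expanded/tiled pattern list.
--     p = output_pos + 1
--     L = len(base_pattern)
--     return [base_pattern[((i + 1) // p) % L] for i in range(input_len)]
-- ===== Notes on version B (the rewrite author's own statement) =====
-- stated objective: faster
-- what changed: B computes each output element directly with the modular index formula base_pattern[((i+1)//(output_pos+1)) % len(base_pattern)] in a single comprehension over output indices, instead of materialising the element-wise expanded pattern, tiling it with a ceil-division copy count, and slicing off the first element.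
-- outside the precondition, e.g. on get_pattern_row([0, 1, 0, -1], -2, 0): A returns [1, 0], B returns []; on get_pattern_row([1], -1, 0): A returns [], B returns []
import Mathlib
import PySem

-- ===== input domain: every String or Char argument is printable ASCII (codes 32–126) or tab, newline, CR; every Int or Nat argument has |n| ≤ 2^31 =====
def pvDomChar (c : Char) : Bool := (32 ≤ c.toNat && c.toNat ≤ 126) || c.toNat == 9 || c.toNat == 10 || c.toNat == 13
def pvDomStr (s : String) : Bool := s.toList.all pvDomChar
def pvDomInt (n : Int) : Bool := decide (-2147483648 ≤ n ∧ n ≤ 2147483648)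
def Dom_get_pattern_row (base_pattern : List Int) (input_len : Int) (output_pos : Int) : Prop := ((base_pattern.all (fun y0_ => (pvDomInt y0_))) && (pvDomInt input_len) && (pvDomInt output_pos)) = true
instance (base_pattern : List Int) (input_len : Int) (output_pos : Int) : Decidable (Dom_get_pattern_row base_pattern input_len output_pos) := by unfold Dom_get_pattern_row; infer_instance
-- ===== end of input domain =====

-- B computes each output element directly by a modular index formula, with no expanded/tiled
-- intermediate pattern list; equivalence is claimed on the natural domain (see Pre_ below).

-- ===== PORT A =====
def get_pattern_row (base_pattern : List Int) (input_len : Int) (output_pos : Int) : List Int :=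
  -- pattern += [x] * (output_pos + 1)   (a negative repeat count gives [], as .toNat does)
  let pattern := base_pattern.foldl (fun acc x => acc ++ List.replicate (output_pos + 1).toNat x) []
  let j := input_len + 1
  -- n = math.ceil(j / len(pattern)): exact integer ceiling -((-j) // len); exact for Dom-sized ints
  let n : Int := -(PySem.Int.floordiv (-j) (pattern.length : Int))
  let pattern := if n > 1 then (List.replicate n.toNat pattern).flatten else pattern
  PySem.List.slice pattern (some 1) (some j)

-- ===== PORT B =====
def get_pattern_row_alt (base_pattern : List Int) (input_len : Int) (output_pos : Int) : List Int :=
  let p := output_pos + 1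
  let L : Int := (base_pattern.length : Int)
  -- base_pattern[idx]: under Pre_ the index is always in range (0 ≤ idx < L), so pyGetD 0 is exact there
  (PySem.List.pyRange 0 input_len 1).map (fun i =>
    PySem.List.pyGetD base_pattern (PySem.Int.mod (PySem.Int.floordiv (i + 1) p) L) 0)

-- ===== PRECONDITION & SPEC =====
-- Pre_ excludes the inputs where A raises ZeroDivisionError (empty base_pattern, or output_pos < 0:
-- the expanded pattern is empty and len(pattern) = 0 divides); it also excludes negative input_len,
-- on which A still returns: a requested row length < 0 is outside the function's natural domain, and
-- there A's negative slice stop yields an accidental chunk of the pattern while B's comprehension is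
-- empty -- two equally accidental conventions on a meaningless input.
def Pre_get_pattern_row (base_pattern : List Int) (input_len : Int) (output_pos : Int) : Prop :=
  base_pattern ≠ [] ∧ 0 ≤ output_pos ∧ 0 ≤ input_len
instance (base_pattern : List Int) (input_len : Int) (output_pos : Int) : Decidable (Pre_get_pattern_row base_pattern input_len output_pos) := by unfold Pre_get_pattern_row; infer_instance
def pvWitness_get_pattern_row : List Int × Int × Int := ([0, 1, 0, -1], 8, 0)

def Spec_get_pattern_row (base_pattern : List Int) (input_len : Int) (output_pos : Int) (out : List Int) : Prop := out = get_pattern_row_alt base_pattern input_len output_pos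
instance (base_pattern : List Int) (input_len : Int) (output_pos : Int) (out : List Int) : Decidable (Spec_get_pattern_row base_pattern input_len output_pos out) := by unfold Spec_get_pattern_row; infer_instance

-- ===== CLAIM (what is proved, stated in full; the proofs are below) =====
def Claim_equal_get_pattern_row : Prop := ∀ (base_pattern : List Int) (input_len : Int) (output_pos : Int), Dom_get_pattern_row base_pattern input_len output_pos → Pre_get_pattern_row base_pattern input_len output_pos → Spec_get_pattern_row base_pattern input_len output_pos (get_pattern_row base_pattern input_len output_pos)

-- ===== LEMMAS AND PROOFS =====

theorem pv_flatMap_replicate_length (base : List Int) (p : Nat) :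
    (base.flatMap (fun x => List.replicate p x)).length = base.length * p := by
  induction base with
  | nil => simp
  | cons b bs ih => simp [List.flatMap_cons, ih]; ring

theorem pv_flatten_replicate_getElem? {α : Type} (xs : List α) (n k : Nat)
    (h : k < n * xs.length) :
    ((List.replicate n xs).flatten)[k]? = xs[k % xs.length]? := by
  induction n generalizing k with
  | zero => omega
  | succ m ih =>
    rw [Nat.succ_mul] at h
    rw [List.replicate_succ, List.flatten_cons]
    by_cases hk : k < xs.length
    · rw [List.getElem?_append_left hk, Nat.mod_eq_of_lt hk]
    · push_neg at hk
      rw [List.getElem?_append_right hk]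
      rw [ih _ (by omega)]
      congr 1
      obtain ⟨d, rfl⟩ : ∃ d, k = xs.length + d := ⟨k - xs.length, by omega⟩
      simp [Nat.add_mod_left]

theorem pv_flatMap_replicate_getElem? (base : List Int) (p m : Nat)
    (h : m < base.length * p) :
    (base.flatMap (fun x => List.replicate p x))[m]? = base[m / p]? := by
  have hp : 0 < p := by rcases Nat.eq_zero_or_pos p with h0 | h0; · rw [h0] at h; omega
                        · exact h0
  induction base generalizing m with
  | nil => simp at h
  | cons b bs ih =>
    rw [List.length_cons, Nat.succ_mul] at h
    rw [List.flatMap_cons]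
    by_cases hm : m < p
    · rw [List.getElem?_append_left (by simpa using hm)]
      rw [Nat.div_eq_of_lt hm]
      simp [hm]
    · push_neg at hm
      rw [List.getElem?_append_right (by simpa using hm)]
      simp only [List.length_replicate]
      rw [ih _ (by omega)]
      obtain ⟨d, rfl⟩ : ∃ d, m = p + d := ⟨m - p, by omega⟩
      have h1 : (p + d) / p = 1 + d / p := by rw [Nat.add_div_left _ hp]; omega
      rw [h1, Nat.add_comm 1 (d / p)]
      simp

theorem pv_clampIdx_nonneg (n : Nat) (j : Int) (hj : 0 ≤ j) :
    PySem.List.clampIdx n j = min j.toNat n := by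
  simp only [PySem.List.clampIdx, if_neg (by omega : ¬ j < 0)]


theorem pv_main (base : List Int) (il op : Int) (hb : base ≠ []) (hop : 0 ≤ op)
    (hil0 : 0 ≤ il) :
    get_pattern_row base il op = get_pattern_row_alt base il op := by
  have hL : 0 < base.length := List.length_pos_iff.mpr hb
  set pN : Nat := (op + 1).toNat with hpN_def
  have hpN : 0 < pN := by omega
  have hpcast : (pN : Int) = op + 1 := by omega
  unfold get_pattern_row get_pattern_row_alt
  simp only []
  rw [show (base.foldl (fun acc x => acc ++ List.replicate (op + 1).toNat x) []) =
        base.flatMap (fun x => List.replicate pN x) from by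
      simpa [hpN_def] using PySem.List.foldl_append_eq_flatMap (fun x => List.replicate pN x) base ([] : List Int)]
  set E : List Int := base.flatMap (fun x => List.replicate pN x) with hE_def
  have hElen : E.length = base.length * pN := pv_flatMap_replicate_length base pN
  have hEpos : 0 < E.length := by rw [hElen]; positivity
  set j : Int := il + 1 with hj_def
  set n : Int := -(PySem.Int.floordiv (-j) (E.length : Int)) with hn_def
  have hceil : (n - 1) * (E.length : Int) < j ∧ j ≤ n * (E.length : Int) :=
    (PySem.Int.neg_floordiv_neg_eq_iff_of_pos (by exact_mod_cast hEpos)).mp rfl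
  by_cases hil : 0 < il
  · -- positive length
    have hj2 : 2 ≤ j := by omega
    have hn1 : 1 ≤ n := by nlinarith [hceil.2, hEpos]
    have hT : (if n > 1 then (List.replicate n.toNat E).flatten else E) =
        (List.replicate n.toNat E).flatten := by
      by_cases hgt : n > 1
      · rw [if_pos hgt]
      · have : n = 1 := by omega
        rw [if_neg hgt, this]
        simp
    rw [hT]
    set T := (List.replicate n.toNat E).flatten with hT_def
    have hTlen : T.length = n.toNat * E.length := by
      simp [hT_def, List.length_flatten, List.map_replicate, List.sum_replicate, smul_eq_mul]
    have hjT : j.toNat ≤ n.toNat * E.length := by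
      have hjle : j ≤ (n.toNat : Int) * (E.length : Int) := by
        rw [Int.toNat_of_nonneg (by omega)]; exact hceil.2
      have hc : ((n.toNat * E.length : Nat) : Int) = (n.toNat : Int) * (E.length : Int) := by
        push_cast; rfl
      omega
    rw [PySem.List.slice_toNat T (by norm_num) (by omega)]
    rw [PySem.List.pyRange_one, List.map_map]
    have hsub : il - 0 = il := by ring
    rw [hsub]
    have htn : j.toNat - (1 : Int).toNat = il.toNat := by omega
    rw [htn]
    apply List.ext_getElem?
    intro i
    simp only [List.getElem?_take, List.getElem?_drop, List.getElem?_map]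
    by_cases hi : i < il.toNat
    · rw [if_pos hi, List.getElem?_range hi]
      simp only [Option.map_some]
      have hidx : (1 : Int).toNat + i < n.toNat * E.length := by omega
      rw [pv_flatten_replicate_getElem? E n.toNat _ hidx]
      have hmod : ((1 : Int).toNat + i) % E.length < base.length * pN := by
        rw [← hElen]; exact Nat.mod_lt _ hEpos
      rw [hElen] at hmod ⊢
      rw [pv_flatMap_replicate_getElem? base pN _ hmod]
      have harg : (0 : Int) + (i : Int) + 1 = ((i + 1 : Nat) : Int) := by push_cast; ring
      simp only [Function.comp_apply]
      rw [harg, ← hpcast, PySem.Int.floordiv_natCast, PySem.Int.mod_natCast,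
          PySem.List.pyGetD_natCast]
      have hidx2 : (i + 1) / pN % base.length < base.length := Nat.mod_lt _ hL
      have hidx1 : ((1 : Int).toNat + i) % (base.length * pN) / pN = (i + 1) / pN % base.length := by
        have h11 : (1 : Int).toNat + i = i + 1 := by omega
        rw [h11, Nat.mul_comm base.length pN, Nat.mod_mul_right_div_self]
      rw [hidx1, List.getElem?_eq_getElem hidx2, List.getD_eq_getElem base 0 hidx2]
    · rw [if_neg hi, List.getElem?_eq_none (by simpa using not_lt.mp hi)]
      simp
  · -- il = 0 : both sides empty
    rw [PySem.List.pyRange_one_eq_nil (by omega)]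
    simp only [List.map_nil]
    have hn1 : ¬ n > 1 := by
      by_contra hgt
      have h1 : (n - 1) * (E.length : Int) ≥ (E.length : Int) := by nlinarith [hEpos]
      have h2 := hceil.1
      omega
    rw [if_neg hn1]
    rw [← List.length_eq_zero_iff, PySem.List.length_slice]
    have h1 : PySem.List.clampIdx E.length 1 = 1 := by
      rw [pv_clampIdx_nonneg _ _ (by norm_num)]
      omega
    have h2 : PySem.List.clampIdx E.length j ≤ 1 := by
      rw [pv_clampIdx_nonneg _ _ (by omega)]
      omega
    omega

-- ===== VERDICT (by name: the statement is the Claim_ definition above) =====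
theorem get_pattern_row_spec : Claim_equal_get_pattern_row := by
  intro base il op _ hpre
  obtain ⟨hb, hop, hil0⟩ := hpre
  exact pv_main base il op hb hop hil0
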